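-- pv_equiv track=rewrite | github.com/jloutey-hash/geovac | geovac/n_electron_spectral.py | _count_triple_even
-- ===== SOURCE A (Python) =====
-- def _count_triple_even(l_max: int) -> int:
--     """Count tuples (l,l,l,l4) with 3l+l4 even."""
--     L = l_max + 1
--     count = 0
--     for l in range(L):
--         if (3 * l) % 2 == 0:
--             # l4 must be even
--             count += (l_max // 2) + 1
--         else:
--             # l4 must be odd
--             count += L - ((l_max // 2) + 1)
--     return count
-- ===== SOURCE B (Python) =====
-- def _count_triple_even(l_max: int) -> int:
--     """Count tuples (l,l,l,l4) with 3l+l4 even."""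
--     if l_max < 0:
--         return 0
--     e = l_max // 2 + 1      # number of even values in 0..l_max
--     o = l_max + 1 - e       # number of odd values
--     return e * e + o * o
-- ===== Notes on version B (the rewrite author's own statement) =====
-- stated objective: faster
-- what changed: Replaces the O(l_max) loop over l with a closed form: since (3l+l4) is even iff l and l4 have equal parity, the count is e^2 + o^2 where e and o are the numbers of even/odd values in 0..l_max.
import Mathlib
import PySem

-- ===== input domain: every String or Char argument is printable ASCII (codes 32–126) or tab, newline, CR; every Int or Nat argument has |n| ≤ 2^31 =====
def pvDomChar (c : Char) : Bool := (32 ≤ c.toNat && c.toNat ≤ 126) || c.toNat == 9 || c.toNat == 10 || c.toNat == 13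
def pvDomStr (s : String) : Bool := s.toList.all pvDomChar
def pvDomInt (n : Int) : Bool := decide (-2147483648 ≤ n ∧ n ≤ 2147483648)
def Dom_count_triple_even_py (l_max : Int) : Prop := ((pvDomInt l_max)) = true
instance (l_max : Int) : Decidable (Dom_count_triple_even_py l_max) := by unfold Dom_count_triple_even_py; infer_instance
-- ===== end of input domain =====

-- ===== PORT A =====
def count_triple_even_py (l_max : Int) : Int :=
  (PySem.List.pyRange 0 (l_max + 1) 1).foldl
    (fun count l =>
      if PySem.Int.mod (3 * l) 2 == 0 then
        count + (PySem.Int.floordiv l_max 2 + 1)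
      else
        count + ((l_max + 1) - (PySem.Int.floordiv l_max 2 + 1)))
    0

-- ===== PORT B =====
-- B replaces A's loop over l with a closed form e*e + o*o (e/o = number of even/odd values in 0..l_max).
def count_triple_even_py_alt (l_max : Int) : Int :=
  if l_max < 0 then 0
  else
    (PySem.Int.floordiv l_max 2 + 1) * (PySem.Int.floordiv l_max 2 + 1)
      + (l_max + 1 - (PySem.Int.floordiv l_max 2 + 1)) * (l_max + 1 - (PySem.Int.floordiv l_max 2 + 1))

-- ===== PRECONDITION & SPEC =====
def Spec_count_triple_even_py (l_max : Int) (out : Int) : Prop := out = count_triple_even_py_alt l_max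
instance (l_max : Int) (out : Int) : Decidable (Spec_count_triple_even_py l_max out) := by unfold Spec_count_triple_even_py; infer_instance

-- ===== CLAIM (what is proved, stated in full; the proofs are below) =====
def Claim_equal_count_triple_even_py : Prop := ∀ (l_max : Int), Dom_count_triple_even_py l_max → Spec_count_triple_even_py l_max (count_triple_even_py l_max)

-- ===== LEMMAS AND PROOFS =====
-- The loop adds E for each even l in 0..n-1 and Oo for each odd l.
lemma fold_eval (E Oo : Int) (n : Nat) (c : Int) :
    (PySem.List.pyRange 0 (n : Int) 1).foldl
      (fun acc l => if PySem.Int.mod (3 * l) 2 == 0 then acc + E else acc + Oo) c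
    = c + (((n + 1) / 2 : Nat) : Int) * E + ((n / 2 : Nat) : Int) * Oo := by
  induction n generalizing c with
  | zero => simp [PySem.List.pyRange_one_eq_nil]
  | succ m ih =>
      rw [show ((m + 1 : Nat) : Int) = (m : Int) + 1 by push_cast; ring,
        PySem.List.pyRange_one_succ_right (by positivity), List.foldl_append, ih]
      have hmod : PySem.Int.mod (3 * (m : Int)) 2 = (3 * (m : Int)) % 2 :=
        PySem.Int.mod_eq_emod_of_pos (by norm_num)
      simp only [List.foldl_cons, List.foldl_nil, hmod]
      rcases Nat.even_or_odd m with ⟨k, hk⟩ | ⟨k, hk⟩ <;> subst hk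
      · rw [if_pos (by simp; omega)]
        rw [show (k + k + 1) / 2 = k from by omega,
          show (k + k) / 2 = k from by omega,
          show (k + k + 1 + 1) / 2 = k + 1 from by omega]
        push_cast; ring
      · rw [if_neg (by simp; omega)]
        rw [show (2 * k + 1 + 1) / 2 = k + 1 from by omega,
          show (2 * k + 1) / 2 = k from by omega,
          show (2 * k + 1 + 1 + 1) / 2 = k + 1 from by omega]
        push_cast; ring

-- ===== VERDICT (by name: the statement is the Claim_ definition above) =====
theorem count_triple_even_py_spec : Claim_equal_count_triple_even_py := by
  intro l_max _
  unfold Spec_count_triple_even_py count_triple_even_py count_triple_even_py_alt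
  by_cases hneg : l_max < 0
  · rw [PySem.List.pyRange_one_eq_nil (by omega), if_pos hneg]
    simp
  · rw [if_neg hneg]
    obtain ⟨n, rfl⟩ := Int.eq_ofNat_of_zero_le (by omega : (0:Int) ≤ l_max)
    have hfd : PySem.Int.floordiv (n : Int) 2 = ((n / 2 : Nat) : Int) :=
      PySem.Int.floordiv_natCast n 2
    rw [show ((n : Int) + 1) = ((n + 1 : Nat) : Int) by push_cast; ring, fold_eval, hfd]
    rcases Nat.even_or_odd n with ⟨k, hk⟩ | ⟨k, hk⟩ <;> subst hk
    · rw [show (k + k + 1 + 1) / 2 = k + 1 from by omega,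
        show (k + k + 1) / 2 = k from by omega,
        show (k + k) / 2 = k from by omega]
      push_cast; ring
    · rw [show (2 * k + 1 + 1 + 1) / 2 = k + 1 from by omega,
        show (2 * k + 1 + 1) / 2 = k + 1 from by omega,
        show (2 * k + 1) / 2 = k from by omega]
      push_cast; ring
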